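-- pv_equiv track=rewrite | github.com/ratzhub/pytest-historic | pytest_historic/app.py | sort_tests
-- ===== SOURCE A (Python) =====
-- def sort_tests(data_list):
--     out = {}
--     for elem in data_list:
--         try:
--             out[elem[1]].extend(elem[2:])
--         except KeyError:
--             out[elem[1]] = list(elem)
--     return [tuple(values) for values in out.values()]
-- ===== SOURCE B (Python) =====
-- def sort_tests(data_list):
--     # collect whole rows per key first, then reduce each group
--     groups = {}
--     for elem in data_list:
--         groups.setdefault(elem[1], []).append(elem)
--     result = []
--     for rows in groups.values():
--         acc = list(rows[0])
--         for r in rows[1:]: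
--             acc.extend(r[2:])
--         result.append(tuple(acc))
--     return result
-- ===== Notes on version B (the rewrite author's own statement) =====
-- stated objective: alternative
-- what changed: Replaces A's on-the-fly dict aggregation (extend-or-initialize per row) with a collect-then-reduce structure: first group whole rows by elem[1] via setdefault, then reduce each group separately.
import Mathlib
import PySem

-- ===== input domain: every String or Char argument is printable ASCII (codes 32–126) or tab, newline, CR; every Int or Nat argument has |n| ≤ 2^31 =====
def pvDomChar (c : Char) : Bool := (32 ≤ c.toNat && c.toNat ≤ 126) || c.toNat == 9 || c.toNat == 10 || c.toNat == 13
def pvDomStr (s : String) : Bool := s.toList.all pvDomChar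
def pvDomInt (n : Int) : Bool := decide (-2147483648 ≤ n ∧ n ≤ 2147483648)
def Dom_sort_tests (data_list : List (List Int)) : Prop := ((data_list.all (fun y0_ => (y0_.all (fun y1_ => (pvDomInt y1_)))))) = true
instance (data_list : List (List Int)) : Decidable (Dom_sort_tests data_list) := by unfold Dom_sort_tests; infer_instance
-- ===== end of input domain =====

-- B replaces A's on-the-fly aggregation with collect-rows-then-reduce (alternative decomposition, same cost).

-- ===== PORT A =====
-- one loop step of A: try out[elem[1]].extend(elem[2:]) except KeyError: out[elem[1]] = list(elem)
def stepA (out : PySem.Dict Int (List Int)) (elem : List Int) : PySem.Dict Int (List Int) :=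
  match PySem.List.pyGet? elem 1 with
  | some k =>
    if out.contains k then out.modify k [] (· ++ PySem.List.slice elem (some 2) none)
    else out.insert k elem
  | none => out   -- elem[1] raises IndexError in Python; excluded by Pre_

def sort_tests (data_list : List (List Int)) : List (List Int) :=
  let out := data_list.foldl stepA PySem.Dict.empty
  out.values

-- ===== PORT B =====
-- one loop step of B: groups.setdefault(elem[1], []).append(elem)
def stepB (g : PySem.Dict Int (List (List Int))) (elem : List Int) : PySem.Dict Int (List (List Int)) :=
  match PySem.List.pyGet? elem 1 with
  | some k => g.modify k [] (· ++ [elem])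
  | none => g   -- elem[1] raises IndexError in Python; excluded by Pre_

-- B's inner reduce: acc = list(rows[0]); for r in rows[1:]: acc.extend(r[2:])
def btReduce (rows : List (List Int)) : List Int :=
  match rows with
  | [] => []   -- unreachable: every stored group is nonempty
  | r0 :: rest => rest.foldl (fun acc r => acc ++ PySem.List.slice r (some 2) none) r0

def sort_tests_alt (data_list : List (List Int)) : List (List Int) :=
  let groups := data_list.foldl stepB PySem.Dict.empty
  groups.values.map btReduce

-- ===== PRECONDITION & SPEC =====
-- Pre_ excludes exactly the inputs on which Python A raises IndexError: a row with fewer than 2 elements (elem[1]).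
def Pre_sort_tests (data_list : List (List Int)) : Prop :=
  (data_list.all (fun e => 2 ≤ e.length)) = true
instance (data_list : List (List Int)) : Decidable (Pre_sort_tests data_list) := by unfold Pre_sort_tests; infer_instance
def pvWitness_sort_tests : List (List Int) := [[1, 5, 10], [2, 5, 20, 30], [3, 7]]
def Spec_sort_tests (data_list : List (List Int)) (out : List (List Int)) : Prop := out = sort_tests_alt data_list
instance (data_list : List (List Int)) (out : List (List Int)) : Decidable (Spec_sort_tests data_list out) := by unfold Spec_sort_tests; infer_instance

-- ===== CLAIM (what is proved, stated in full; the proofs are below) =====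
def Claim_equal_sort_tests : Prop := ∀ (data_list : List (List Int)), Dom_sort_tests data_list → Pre_sort_tests data_list → Spec_sort_tests data_list (sort_tests data_list)

-- ===== LEMMAS AND PROOFS =====

-- the per-entry correspondence: A's dict value is the reduction of B's group of rows
def pvF : Int × List (List Int) → Int × List Int := fun p => (p.1, btReduce p.2)

theorem btReduce_snoc (rows : List (List Int)) (elem : List Int) (h : rows ≠ []) :
    btReduce (rows ++ [elem]) = btReduce rows ++ PySem.List.slice elem (some 2) none := by
  cases rows with
  | nil => exact absurd rfl h
  | cons r0 rest => simp [btReduce, List.foldl_append]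

theorem contains_map_F (dA : PySem.Dict Int (List Int)) (dB : PySem.Dict Int (List (List Int)))
    (h : dA.items = dB.items.map pvF) (k : Int) : dA.contains k = dB.contains k := by
  simp [PySem.Dict.contains, h, List.any_map, Function.comp_def, pvF]

theorem loop_inv (l : List (List Int)) :
    ∀ (dA : PySem.Dict Int (List Int)) (dB : PySem.Dict Int (List (List Int))),
    dA.items = dB.items.map pvF → dB.keys.Nodup → (∀ p ∈ dB.items, p.2 ≠ []) →
    (l.foldl stepA dA).items = (l.foldl stepB dB).items.map pvF := by
  induction l with
  | nil => intro dA dB h _ _; simpa using h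
  | cons elem rest ih =>
    intro dA dB h hnd hne
    simp only [List.foldl_cons]
    have hkeys : dA.keys = dB.keys := by
      simp [PySem.Dict.keys, h, pvF, Function.comp]
    cases hg : PySem.List.pyGet? elem 1 with
    | none => exact ih _ _ (by simp [stepA, stepB, hg, h]) (by simp [stepB, hg, hnd]) (by simpa [stepB, hg] using hne)
    | some k =>
      have hc := contains_map_F dA dB h k
      by_cases hck : dB.contains k = true
      · -- key present: A extends, B appends the row
        have hstepA : stepA dA elem = dA.insert k (dA.getD k [] ++ PySem.List.slice elem (some 2) none) := by
          simp [stepA, hg, hc, hck, PySem.Dict.modify]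
        have hstepB : stepB dB elem = dB.insert k (dB.getD k [] ++ [elem]) := by
          simp [stepB, hg, PySem.Dict.modify]
        have hitems : (stepA dA elem).items = (stepB dB elem).items.map pvF := by
          rw [hstepA, hstepB, PySem.Dict.items_insert_of_contains _ _ (hc ▸ hck),
              PySem.Dict.items_insert_of_contains _ _ hck, h, List.map_map, List.map_map]
          apply List.map_congr_left
          intro p hp
          by_cases hpk : (p.1 == k) = true
          · have hpk' : p.1 = k := by simpa using hpk
            have hBval : dB.getD k [] = p.2 :=
              PySem.Dict.getD_of_mem_items _ (hpk' ▸ hp) hnd _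
            have hAval : dA.getD k [] = btReduce p.2 := by
              have hmem : (k, btReduce p.2) ∈ dA.items := by
                rw [h]; exact List.mem_map.mpr ⟨p, hp, by simp [pvF, hpk']⟩
              exact PySem.Dict.getD_of_mem_items _ hmem (by rw [hkeys]; exact hnd) _
            simp [Function.comp, pvF, hpk, hAval, hBval,
              btReduce_snoc p.2 elem (hne p hp)]
          · simp [Function.comp, pvF, hpk]
        refine ih _ _ hitems ?_ ?_
        · rw [hstepB]; exact PySem.Dict.nodup_keys_insert _ _ _ hnd
        · intro p hp
          rw [hstepB] at hp
          rcases (PySem.Dict.mem_items_insert _ _ _ _).1 hp with h1 | h2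
          · subst h1; simp
          · exact hne p h2.1
      · -- key absent: both append a fresh entry
        have hck' : dB.contains k = false := by simpa using hck
        have hstepA : stepA dA elem = dA.insert k elem := by
          simp [stepA, hg, hc, hck']
        have hstepB : stepB dB elem = dB.insert k [elem] := by
          simp [stepB, hg, PySem.Dict.modify, PySem.Dict.getD_of_not_contains _ _ hck']
        have hitems : (stepA dA elem).items = (stepB dB elem).items.map pvF := by
          rw [hstepA, hstepB,
              PySem.Dict.items_insert_of_not_contains _ _ (by rw [hc]; exact hck'),
              PySem.Dict.items_insert_of_not_contains _ _ hck', h]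
          simp [pvF, btReduce]
        refine ih _ _ hitems ?_ ?_
        · rw [hstepB]; exact PySem.Dict.nodup_keys_insert _ _ _ hnd
        · intro p hp
          rw [hstepB] at hp
          rcases (PySem.Dict.mem_items_insert _ _ _ _).1 hp with h1 | h2
          · subst h1; simp
          · exact hne p h2.1

-- ===== VERDICT (by name: the statement is the Claim_ definition above) =====
theorem sort_tests_spec : Claim_equal_sort_tests := by
  intro data_list _ _
  unfold Spec_sort_tests sort_tests sort_tests_alt
  have h := loop_inv data_list PySem.Dict.empty PySem.Dict.empty
    (by simp [PySem.Dict.empty]) (by simp [PySem.Dict.keys, PySem.Dict.empty]) (by simp [PySem.Dict.empty])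
  simp only [PySem.Dict.values, h, List.map_map]
  rfl
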